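-- pv_equiv track=rewrite | github.com/pypi-data/pypi-mirror-369 | packages/mysql-compare/mysql_compare-0.7.14.post11-py3-none-any.whl/mysql_compare/repair.py | get_query_full_table_statement_params
-- ===== SOURCE A (Python) =====
-- def get_query_full_table_statement_params(database: str, table: str, table_keys, select_cols: list[str], limit_size: int, ckpt_row: dict = None):
--     _keyval = ckpt_row
--     # select * from where 1 = 1 and ((a > xxx) or (a = xxx and b > yyy) or (a = xxx and b = yyy and c > zzz)) order by a,b,c limit checksize
--     orderby_clause = ", ".join([f"`{col[0]}`" for col in table_keys])
--
--     select_clause = ", ".join(select_cols)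
--
--     for _, column_type in table_keys:
--         if column_type in ["int", "double", "char", "date", "decimal", "varchar", "bigint", "tinyint", "smallint"]:
--             pass
--         else:
--             raise ValueError(f"Data type: [{column_type}] is not supported yet.")
--
--     where_conditions = []
--     for end_idx in range(len(table_keys)):
--         condition_parts = []
--         for i, (column_name, _) in enumerate(table_keys[: end_idx + 1]):
--             operator = ">" if i == end_idx else "="
--             condition_parts.append(f"`{column_name}` {operator} %s")
--         where_conditions.append(" and ".join(condition_parts))
--     where_clause = "(" + ") or (".join(where_conditions) + ")"
--
--     statement_with_condition = f"SELECT {select_clause} FROM `{database}`.`{table}` WHERE {where_clause} ORDER BY {orderby_clause} LIMIT {limit_size}"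
--     statement_without_condition = f"SELECT {select_clause} FROM `{database}`.`{table}` ORDER BY {orderby_clause} LIMIT {limit_size}"
--
--     _params: list = []
--     if _keyval:
--         for end_idx in range(len(table_keys)):
--             for i, (column_name, _) in enumerate(table_keys[: end_idx + 1]):
--                 _params.append(_keyval[column_name])
--
--     statement = statement_with_condition if _params else statement_without_condition
--
--     return statement, _params
-- ===== SOURCE B (Python) =====
-- def get_query_full_table_statement_params(database: str, table: str, table_keys, select_cols: list[str], limit_size: int, ckpt_row: dict = None):
--     supported = {"int", "double", "char", "date", "decimal", "varchar", "bigint", "tinyint", "smallint"}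
--     for _, column_type in table_keys:
--         if column_type not in supported:
--             raise ValueError(f"Data type: [{column_type}] is not supported yet.")
--
--     # one forward pass: keep the running list of '`col` = %s' equalities and the
--     # running prefix of checkpoint values; each key contributes one OR-branch.
--     equalities = []
--     conditions = []
--     params = []
--     prefix_vals = []
--     for column_name, _ in table_keys:
--         conditions.append(" and ".join(equalities + [f"`{column_name}` > %s"]))
--         equalities.append(f"`{column_name}` = %s")
--         if ckpt_row:
--             prefix_vals.append(ckpt_row[column_name])
--             params.extend(prefix_vals)
--
--     select_clause = ", ".join(select_cols)
--     orderby_clause = ", ".join(f"`{c}`" for c, _ in table_keys)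
--     if params:
--         where_clause = "(" + ") or (".join(conditions) + ")"
--         statement = f"SELECT {select_clause} FROM `{database}`.`{table}` WHERE {where_clause} ORDER BY {orderby_clause} LIMIT {limit_size}"
--     else:
--         statement = f"SELECT {select_clause} FROM `{database}`.`{table}` ORDER BY {orderby_clause} LIMIT {limit_size}"
--     return statement, params
-- ===== Notes on version B (the rewrite author's own statement) =====
-- stated objective: simpler
-- what changed: Replaces A's two nested index-sliced loops over range(len(table_keys)) with prefix slices table_keys[:end_idx+1] by a single forward pass that maintains accumulator lists of '`col` = %s' equalities and of checkpoint prefix values, emitting each OR-branch and its params incrementally.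
import Mathlib
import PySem

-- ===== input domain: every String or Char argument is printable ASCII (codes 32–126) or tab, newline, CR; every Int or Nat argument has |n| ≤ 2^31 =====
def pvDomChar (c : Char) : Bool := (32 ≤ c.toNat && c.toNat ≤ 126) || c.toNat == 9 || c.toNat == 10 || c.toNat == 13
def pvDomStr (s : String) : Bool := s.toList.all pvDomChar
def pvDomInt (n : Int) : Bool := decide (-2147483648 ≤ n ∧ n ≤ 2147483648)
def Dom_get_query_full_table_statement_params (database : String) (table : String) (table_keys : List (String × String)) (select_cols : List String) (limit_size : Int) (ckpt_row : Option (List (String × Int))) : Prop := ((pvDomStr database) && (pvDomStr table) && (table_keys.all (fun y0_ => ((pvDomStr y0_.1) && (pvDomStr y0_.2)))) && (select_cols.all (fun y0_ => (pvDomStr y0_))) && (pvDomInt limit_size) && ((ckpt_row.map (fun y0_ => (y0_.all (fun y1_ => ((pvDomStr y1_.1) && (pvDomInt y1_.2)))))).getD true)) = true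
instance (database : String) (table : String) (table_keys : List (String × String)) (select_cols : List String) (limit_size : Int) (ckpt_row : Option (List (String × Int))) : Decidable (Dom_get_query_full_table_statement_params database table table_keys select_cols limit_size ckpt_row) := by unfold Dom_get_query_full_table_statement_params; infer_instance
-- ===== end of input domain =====

-- B replaces A's two index-sliced nested loops (over range(len) with prefix slices) by one
-- forward accumulator pass over table_keys; objective: simpler/alternative decomposition.

-- shared Python primitives of both ports: dict truthiness and dict[key] lookup
-- (lookup is total here; Pre_ excludes the KeyError inputs, so the default is never the value used)
def pyTruthyCk (ck : Option (List (String × Int))) : Bool :=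
  match ck with
  | none => false
  | some l => !l.isEmpty

def pyDictGetD (l : List (String × Int)) (k : String) : Int :=
  match l.find? (fun p => p.1 == k) with
  | some p => p.2
  | none => 0

-- ===== PORT A =====
def get_query_full_table_statement_params (database : String) (table : String) (table_keys : List (String × String)) (select_cols : List String) (limit_size : Int) (ckpt_row : Option (List (String × Int))) : String × List Int :=
  let orderby_clause := PySem.Str.join ", " (table_keys.map (fun col => "`" ++ col.1 ++ "`"))
  let select_clause := PySem.Str.join ", " select_cols
  -- the type-check loop either passes or raises ValueError; the raising inputs are outside Pre_
  let where_conditions := (List.range table_keys.length).foldl (fun wcs end_idx =>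
    let condition_parts := (PySem.List.enumerate (table_keys.take (end_idx + 1))).foldl
      (fun cps p =>
        let operator := if p.1 == (end_idx : Int) then ">" else "="
        cps ++ ["`" ++ p.2.1 ++ "` " ++ operator ++ " %s"]) []
    wcs ++ [PySem.Str.join " and " condition_parts]) []
  let where_clause := "(" ++ PySem.Str.join ") or (" where_conditions ++ ")"
  let statement_with_condition := "SELECT " ++ select_clause ++ " FROM `" ++ database ++ "`.`" ++ table ++ "` WHERE " ++ where_clause ++ " ORDER BY " ++ orderby_clause ++ " LIMIT " ++ PySem.Int.toStr limit_size
  let statement_without_condition := "SELECT " ++ select_clause ++ " FROM `" ++ database ++ "`.`" ++ table ++ "` ORDER BY " ++ orderby_clause ++ " LIMIT " ++ PySem.Int.toStr limit_size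
  let params : List Int :=
    if pyTruthyCk ckpt_row then
      (List.range table_keys.length).foldl (fun ps end_idx =>
        (PySem.List.enumerate (table_keys.take (end_idx + 1))).foldl
          (fun ps2 p => ps2 ++ [pyDictGetD (ckpt_row.getD []) p.2.1]) ps) []
    else []
  let statement := if params.isEmpty then statement_without_condition else statement_with_condition
  (statement, params)

-- ===== PORT B =====
def get_query_full_table_statement_params_alt (database : String) (table : String) (table_keys : List (String × String)) (select_cols : List String) (limit_size : Int) (ckpt_row : Option (List (String × Int))) : String × List Int :=
  -- state: (equalities, conditions, params, prefix_vals)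
  let st := table_keys.foldl
    (fun (st : List String × List String × List Int × List Int) kv =>
      let conditions := st.2.1 ++ [PySem.Str.join " and " (st.1 ++ ["`" ++ kv.1 ++ "` > %s"])]
      let equalities := st.1 ++ ["`" ++ kv.1 ++ "` = %s"]
      if pyTruthyCk ckpt_row then
        let prefix_vals := st.2.2.2 ++ [pyDictGetD (ckpt_row.getD []) kv.1]
        (equalities, conditions, st.2.2.1 ++ prefix_vals, prefix_vals)
      else
        (equalities, conditions, st.2.2.1, st.2.2.2))
    ([], [], [], [])
  let select_clause := PySem.Str.join ", " select_cols
  let orderby_clause := PySem.Str.join ", " (table_keys.map (fun c => "`" ++ c.1 ++ "`"))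
  let params := st.2.2.1
  if params.isEmpty then
    ("SELECT " ++ select_clause ++ " FROM `" ++ database ++ "`.`" ++ table ++ "` ORDER BY " ++ orderby_clause ++ " LIMIT " ++ PySem.Int.toStr limit_size, params)
  else
    let where_clause := "(" ++ PySem.Str.join ") or (" st.2.1 ++ ")"
    ("SELECT " ++ select_clause ++ " FROM `" ++ database ++ "`.`" ++ table ++ "` WHERE " ++ where_clause ++ " ORDER BY " ++ orderby_clause ++ " LIMIT " ++ PySem.Int.toStr limit_size, params)

-- ===== PRECONDITION & SPEC =====
def pySupportedTypes : List String := ["int", "double", "char", "date", "decimal", "varchar", "bigint", "tinyint", "smallint"]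

-- Pre_ excludes exactly the inputs where the Python raises: a key whose type is not in the
-- supported list (ValueError), or a truthy ckpt_row missing one of the key columns (KeyError).
def Pre_get_query_full_table_statement_params (database : String) (table : String) (table_keys : List (String × String)) (select_cols : List String) (limit_size : Int) (ckpt_row : Option (List (String × Int))) : Prop :=
  ∀ p ∈ table_keys, p.2 ∈ pySupportedTypes ∧
    (pyTruthyCk ckpt_row = true → (ckpt_row.getD []).any (fun q => q.1 == p.1) = true)
instance (database : String) (table : String) (table_keys : List (String × String)) (select_cols : List String) (limit_size : Int) (ckpt_row : Option (List (String × Int))) : Decidable (Pre_get_query_full_table_statement_params database table table_keys select_cols limit_size ckpt_row) := by unfold Pre_get_query_full_table_statement_params; infer_instance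

def pvWitness_get_query_full_table_statement_params : String × String × (List (String × String)) × List String × Int × (Option (List (String × Int))) :=
  ("db", "t", [("a", "int"), ("b", "varchar")], ["a", "b"], 100, some [("a", 3), ("b", 7)])

def Spec_get_query_full_table_statement_params (database : String) (table : String) (table_keys : List (String × String)) (select_cols : List String) (limit_size : Int) (ckpt_row : Option (List (String × Int))) (out : String × List Int) : Prop := out = get_query_full_table_statement_params_alt database table table_keys select_cols limit_size ckpt_row
instance (database : String) (table : String) (table_keys : List (String × String)) (select_cols : List String) (limit_size : Int) (ckpt_row : Option (List (String × Int))) (out : String × List Int) : Decidable (Spec_get_query_full_table_statement_params database table table_keys select_cols limit_size ckpt_row out) := by unfold Spec_get_query_full_table_statement_params; infer_instance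

-- ===== CLAIM (what is proved, stated in full; the proofs are below) =====
def Claim_equal_get_query_full_table_statement_params : Prop := ∀ (database : String) (table : String) (table_keys : List (String × String)) (select_cols : List String) (limit_size : Int) (ckpt_row : Option (List (String × Int))), Dom_get_query_full_table_statement_params database table table_keys select_cols limit_size ckpt_row → Pre_get_query_full_table_statement_params database table table_keys select_cols limit_size ckpt_row → Spec_get_query_full_table_statement_params database table table_keys select_cols limit_size ckpt_row (get_query_full_table_statement_params database table table_keys select_cols limit_size ckpt_row)

-- ===== LEMMAS AND PROOFS =====

-- closed forms both ports' condition/param computations are reduced to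
def eqPart (k : String) : String := "`" ++ k ++ "` = %s"
def gtPart (k : String) : String := "`" ++ k ++ "` > %s"

def condsClosed (tks : List (String × String)) : List String :=
  (List.range tks.length).map (fun e =>
    PySem.Str.join " and " ((tks.take e).map (fun p => eqPart p.1) ++ [gtPart (tks.getD e ("", "")).1]))

def paramsClosed (ck : List (String × Int)) (tks : List (String × String)) : List Int :=
  (List.range tks.length).flatMap (fun e => (tks.take (e + 1)).map (fun p => pyDictGetD ck p.1))

theorem condsClosed_concat (tks : List (String × String)) (x : String × String) :
    condsClosed (tks ++ [x]) =
      condsClosed tks ++ [PySem.Str.join " and " (tks.map (fun p => eqPart p.1) ++ [gtPart x.1])] := by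
  unfold condsClosed
  rw [List.length_append, List.length_singleton, List.range_succ, List.map_append]
  congr 1
  · refine List.map_congr_left (fun e he => ?_)
    have he' : e < tks.length := List.mem_range.mp he
    rw [List.take_append_of_le_length (by omega), List.getD_append _ _ _ _ (by omega)]
  · simp

theorem paramsClosed_concat (ck : List (String × Int)) (tks : List (String × String)) (x : String × String) :
    paramsClosed ck (tks ++ [x]) =
      paramsClosed ck tks ++ (tks.map (fun p => pyDictGetD ck p.1) ++ [pyDictGetD ck x.1]) := by
  unfold paramsClosed
  rw [List.length_append, List.length_singleton, List.range_succ, List.flatMap_append]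
  congr 1
  · refine List.flatMap_congr (fun e he => ?_)
    have he' : e < tks.length := List.mem_range.mp he
    rw [List.take_append_of_le_length (by omega)]
  · simp

-- each prefix of A's inner enumerate-loop yields eqParts on the prefix and a gtPart on the last key
theorem enum_parts (tks : List (String × String)) (e : Nat) (he : e < tks.length) :
    ((PySem.List.enumerate (tks.take (e + 1))).foldl
      (fun cps p => cps ++ ["`" ++ p.2.1 ++ "` " ++ (if p.1 == (e : Int) then ">" else "=") ++ " %s"]) []) =
    (tks.take e).map (fun p => eqPart p.1) ++ [gtPart (tks.getD e ("", "")).1] := by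
  rw [PySem.List.foldl_append_singleton_eq_map, List.nil_append]
  have htake : tks.take (e + 1) = tks.take e ++ [tks[e]] := by
    rw [List.take_add_one, List.getElem?_eq_getElem he]; rfl
  rw [htake, PySem.List.enumerate_append, List.map_append]
  congr 1
  · calc List.map (fun p => ("`" ++ p.2.1 ++ "` " ++ if (p.1 == (e : Int)) = true then ">" else "=") ++ " %s")
          (PySem.List.enumerate (List.take e tks))
        = List.map (fun p => eqPart p.2.1) (PySem.List.enumerate (List.take e tks)) := by
          refine List.map_congr_left (fun p hp => ?_)
          rw [PySem.List.mem_enumerate_iff] at hp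
          obtain ⟨k, hk, rfl⟩ := hp
          have hkk : k < e := (by simpa using hk : k < e ∧ k < tks.length).1
          have hne : ((0 : Int) + k == (e : Int)) = false := by
            simp only [beq_eq_false_iff_ne]; omega
          rw [hne]
          simp [eqPart, String.append_assoc]
      _ = ((PySem.List.enumerate (List.take e tks)).map (fun p => p.2)).map (fun q => eqPart q.1) := by
          rw [List.map_map]; rfl
      _ = (List.take e tks).map (fun p => eqPart p.1) := by
          rw [PySem.List.map_snd_enumerate]
  · simp only [List.length_take, Nat.min_eq_left (by omega : e ≤ tks.length)]
    simp only [PySem.List.enumerate, List.map]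
    simp [gtPart, List.getD, List.getElem?_eq_getElem he, String.append_assoc]

-- A's outer conditions loop equals the closed form
theorem A_conds (tks : List (String × String)) :
    ((List.range tks.length).foldl (fun wcs end_idx =>
      let condition_parts := (PySem.List.enumerate (tks.take (end_idx + 1))).foldl
        (fun cps p =>
          let operator := if p.1 == (end_idx : Int) then ">" else "="
          cps ++ ["`" ++ p.2.1 ++ "` " ++ operator ++ " %s"]) []
      wcs ++ [PySem.Str.join " and " condition_parts]) []) = condsClosed tks := by
  simp only []
  rw [PySem.List.foldl_append_singleton_eq_map, List.nil_append]
  unfold condsClosed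
  refine List.map_congr_left (fun e he => ?_)
  rw [enum_parts tks e (List.mem_range.mp he)]

-- A's params loop equals the closed form
theorem A_params (ck : List (String × Int)) (tks : List (String × String)) :
    ((List.range tks.length).foldl (fun ps end_idx =>
      (PySem.List.enumerate (tks.take (end_idx + 1))).foldl
        (fun ps2 p => ps2 ++ [pyDictGetD ck p.2.1]) ps) []) = paramsClosed ck tks := by
  have hinner : ∀ (e : Nat) (ps : List Int),
      (PySem.List.enumerate (tks.take (e + 1))).foldl
        (fun ps2 p => ps2 ++ [pyDictGetD ck p.2.1]) ps
      = ps ++ (tks.take (e + 1)).map (fun p => pyDictGetD ck p.1) := by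
    intro e ps
    rw [PySem.List.foldl_append_singleton_eq_map]
    congr 1
    calc (PySem.List.enumerate (tks.take (e + 1))).map (fun p => pyDictGetD ck p.2.1)
        = ((PySem.List.enumerate (tks.take (e + 1))).map (fun p => p.2)).map
            (fun q => pyDictGetD ck q.1) := by rw [List.map_map]; rfl
      _ = (tks.take (e + 1)).map (fun p => pyDictGetD ck p.1) := by
          rw [PySem.List.map_snd_enumerate]
  calc ((List.range tks.length).foldl (fun ps end_idx =>
          (PySem.List.enumerate (tks.take (end_idx + 1))).foldl
            (fun ps2 p => ps2 ++ [pyDictGetD ck p.2.1]) ps) [])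
      = (List.range tks.length).foldl
          (fun ps e => ps ++ (tks.take (e + 1)).map (fun p => pyDictGetD ck p.1)) [] := by
        apply PySem.List.foldl_congr_mem'
        intro e _ ps
        exact hinner e ps
    _ = paramsClosed ck tks := by
        rw [PySem.List.foldl_append_eq_flatMap, List.nil_append]; rfl

-- B's single pass equals the closed forms (induction from the right over table_keys)
theorem B_fold (ck : Option (List (String × Int))) (tks : List (String × String)) :
    (tks.foldl
      (fun (st : List String × List String × List Int × List Int) kv =>
        let conditions := st.2.1 ++ [PySem.Str.join " and " (st.1 ++ ["`" ++ kv.1 ++ "` > %s"])]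
        let equalities := st.1 ++ ["`" ++ kv.1 ++ "` = %s"]
        if pyTruthyCk ck then
          let prefix_vals := st.2.2.2 ++ [pyDictGetD (ck.getD []) kv.1]
          (equalities, conditions, st.2.2.1 ++ prefix_vals, prefix_vals)
        else
          (equalities, conditions, st.2.2.1, st.2.2.2))
      ([], [], [], []))
    = (tks.map (fun p => eqPart p.1), condsClosed tks,
       (if pyTruthyCk ck then paramsClosed (ck.getD []) tks else []),
       (if pyTruthyCk ck then tks.map (fun p => pyDictGetD (ck.getD []) p.1) else [])) := by
  induction tks using List.reverseRecOn with
  | nil => by_cases h : pyTruthyCk ck = true <;> simp [condsClosed, paramsClosed, h]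
  | append_singleton l x ih =>
    rw [List.foldl_append, ih, List.foldl_cons, List.foldl_nil]
    by_cases h : pyTruthyCk ck = true <;>
      simp only [h, if_true, if_false, Bool.false_eq_true] <;>
      rw [condsClosed_concat] <;>
      simp [eqPart, gtPart, paramsClosed_concat]

-- ===== VERDICT (by name: the statement is the Claim_ definition above) =====
theorem get_query_full_table_statement_params_spec : Claim_equal_get_query_full_table_statement_params := by
  intro database table table_keys select_cols limit_size ckpt_row _ _
  unfold Spec_get_query_full_table_statement_params
  unfold get_query_full_table_statement_params get_query_full_table_statement_params_alt
  rw [B_fold]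
  simp only [A_conds, A_params]
  by_cases h : pyTruthyCk ckpt_row = true
  · simp only [h, if_true]
    by_cases hp : (paramsClosed (ckpt_row.getD []) table_keys).isEmpty = true <;> simp [hp]
  · simp only [h, Bool.false_eq_true, if_false, List.isEmpty_nil, if_true]
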